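-- pv_equiv track=rewrite | github.com/mikez93/imap-to-gmail-migration-toolkit | supervisor/process.py | extract_account_from_cmdline
-- ===== SOURCE A (Python) =====
-- from typing import List, Optional
--
-- def extract_account_from_cmdline(cmdline: List[str]) -> Optional[str]:
--     """Extract account email from imapsync command line."""
--     # Try --user2 first (destination = canonical)
--     for i, arg in enumerate(cmdline):
--         if arg == '--user2' and i + 1 < len(cmdline):
--             return cmdline[i + 1].strip("'\"")
--         if arg.startswith('--user2='):
--             return arg.split('=', 1)[1].strip("'\"")
--
--     # Fall back to --user1
--     for i, arg in enumerate(cmdline):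
--         if arg == '--user1' and i + 1 < len(cmdline):
--             return cmdline[i + 1].strip("'\"")
--         if arg.startswith('--user1='):
--             return arg.split('=', 1)[1].strip("'\"")
--
--     return None
-- ===== SOURCE B (Python) =====
-- from typing import List, Optional
--
-- def extract_account_from_cmdline(cmdline: List[str]) -> Optional[str]:
--     """Extract account email from imapsync command line.
--
--     Parse-then-lookup: one pass records the first value seen for each of
--     --user2/--user1 in a dict, then --user2 is preferred over --user1.
--     """
--     first = {}
--     for arg, nxt in zip(cmdline, cmdline[1:] + [None]):
--         for tag in ('2', '1'):
--             flag = '--user' + tag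
--             if arg == flag and nxt is not None:
--                 value = nxt.strip("'\"")
--             elif arg.startswith(flag + '='):
--                 value = arg.split('=', 1)[1].strip("'\"")
--             else:
--                 continue
--             if tag not in first:
--                 first[tag] = value
--     return first.get('2', first.get('1'))
-- ===== Notes on version B (the rewrite author's own statement) =====
-- stated objective: alternative
-- what changed: Replaces A's two sequential flag-specific scans with a parse-then-lookup design: a single pass over (arg, next) pairs records the first value for each of --user2/--user1 in a dict, and the answer is a dict lookup preferring --user2.
import Mathlib
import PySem

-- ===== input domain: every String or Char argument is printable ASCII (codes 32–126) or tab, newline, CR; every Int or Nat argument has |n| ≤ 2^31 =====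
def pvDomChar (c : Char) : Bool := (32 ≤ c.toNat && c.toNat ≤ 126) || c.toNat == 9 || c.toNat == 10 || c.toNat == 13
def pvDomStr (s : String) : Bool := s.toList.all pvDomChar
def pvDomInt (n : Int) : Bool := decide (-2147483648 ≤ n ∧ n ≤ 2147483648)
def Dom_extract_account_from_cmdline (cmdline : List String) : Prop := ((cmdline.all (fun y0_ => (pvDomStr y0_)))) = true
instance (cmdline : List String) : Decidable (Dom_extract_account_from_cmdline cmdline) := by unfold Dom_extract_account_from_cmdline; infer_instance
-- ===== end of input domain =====

-- B replaces A's two flag-specific sequential scans with parse-then-lookup: one pass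
-- records the first value per flag in a dict, then a lookup prefers --user2 (objective: alternative).

-- ===== PORT A =====
-- first loop of A: scan for --user2
def pvScanU2 : List String → Option String
  | [] => none
  | a :: rest =>
    if a = "--user2" ∧ rest ≠ [] then some (PySem.Str.stripChars (rest.headD "") "'\"")
    else if PySem.Str.startswith a "--user2=" then
      some (PySem.Str.stripChars (((PySem.Str.splitMax? a "=" 1).getD []).getD 1 "") "'\"")
    else pvScanU2 rest

-- second loop of A: scan for --user1
def pvScanU1 : List String → Option String
  | [] => none
  | a :: rest =>
    if a = "--user1" ∧ rest ≠ [] then some (PySem.Str.stripChars (rest.headD "") "'\"")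
    else if PySem.Str.startswith a "--user1=" then
      some (PySem.Str.stripChars (((PySem.Str.splitMax? a "=" 1).getD []).getD 1 "") "'\"")
    else pvScanU1 rest

def extract_account_from_cmdline (cmdline : List String) : Option String :=
  match pvScanU2 cmdline with
  | some v => some v
  | none => pvScanU1 cmdline

-- ===== PORT B =====
-- the value position (arg, nxt) contributes for flag '--user<tag>' (the if/elif/continue of Source B)
def pvMatchFlag (arg : String) (nxt : Option String) (tag : String) : Option String :=
  let flag := "--user" ++ tag
  if arg = flag ∧ nxt ≠ none then some (PySem.Str.stripChars (nxt.getD "") "'\"")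
  else if PySem.Str.startswith arg (flag ++ "=") then
    some (PySem.Str.stripChars (((PySem.Str.splitMax? arg "=" 1).getD []).getD 1 "") "'\"")
  else none

-- the inner  for tag in ('2', '1')  body: record the value only if tag is not yet present
def pvStepB (d : PySem.Dict String String) (p : String × Option String) : PySem.Dict String String :=
  ["2", "1"].foldl (fun d tag =>
    match pvMatchFlag p.1 p.2 tag with
    | some v => if d.contains tag then d else d.insert tag v
    | none => d) d

-- zip(cmdline, cmdline[1:] + [None]) of Source B
def pvZipped (l : List String) : List (String × Option String) :=
  l.zip ((l.drop 1).map some ++ [none])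

def extract_account_from_cmdline_alt (cmdline : List String) : Option String :=
  let first := (pvZipped cmdline).foldl pvStepB PySem.Dict.empty
  match first.get? "2" with
  | some v => some v
  | none => first.get? "1"

-- ===== PRECONDITION & SPEC =====
def Spec_extract_account_from_cmdline (cmdline : List String) (out : Option String) : Prop := out = extract_account_from_cmdline_alt cmdline
instance (cmdline : List String) (out : Option String) : Decidable (Spec_extract_account_from_cmdline cmdline out) := by unfold Spec_extract_account_from_cmdline; infer_instance

-- ===== CLAIM (what is proved, stated in full; the proofs are below) =====
def Claim_equal_extract_account_from_cmdline : Prop := ∀ (cmdline : List String), Dom_extract_account_from_cmdline cmdline → Spec_extract_account_from_cmdline cmdline (extract_account_from_cmdline cmdline)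

-- ===== LEMMAS AND PROOFS =====

theorem pvZipped_cons (a : String) (rest : List String) :
    pvZipped (a :: rest) = (a, rest.head?) :: pvZipped rest := by
  cases rest <;> simp [pvZipped]

theorem pvScanU2_cons (a : String) (rest : List String) :
    pvScanU2 (a :: rest) = (pvMatchFlag a rest.head? "2").or (pvScanU2 rest) := by
  simp only [pvScanU2, pvMatchFlag]
  cases rest <;> simp_all <;> split_ifs <;> simp_all

theorem pvScanU1_cons (a : String) (rest : List String) :
    pvScanU1 (a :: rest) = (pvMatchFlag a rest.head? "1").or (pvScanU1 rest) := by
  simp only [pvScanU1, pvMatchFlag]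
  cases rest <;> simp_all <;> split_ifs <;> simp_all

-- lookups after one step of B's parsing pass
theorem pvStepB_get2 (d : PySem.Dict String String) (p : String × Option String) :
    (pvStepB d p).get? "2" = (d.get? "2").or (pvMatchFlag p.1 p.2 "2") := by
  simp only [pvStepB, List.foldl]
  cases h2 : pvMatchFlag p.1 p.2 "2" <;> cases h1 : pvMatchFlag p.1 p.2 "1" <;>
    simp <;> split_ifs with hc <;>
    simp_all [PySem.Dict.contains_eq_isSome_get?, PySem.Dict.get?_insert,
      Option.isSome_iff_exists] <;>
    first
    | (obtain ⟨w, hw⟩ := hc; simp [hw])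
    | (cases hg : d.get? "2" <;> simp_all)

theorem pvStepB_get1 (d : PySem.Dict String String) (p : String × Option String) :
    (pvStepB d p).get? "1" = (d.get? "1").or (pvMatchFlag p.1 p.2 "1") := by
  simp only [pvStepB, List.foldl]
  cases h2 : pvMatchFlag p.1 p.2 "2" <;> cases h1 : pvMatchFlag p.1 p.2 "1" <;>
    simp <;> split_ifs with hc <;>
    simp_all [PySem.Dict.contains_eq_isSome_get?,
      PySem.Dict.get?_insert, Option.isSome_iff_exists] <;>
    first
    | (obtain ⟨w, hw⟩ := hc; simp [hw])
    | (cases hg : d.get? "1" <;> simp_all)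

-- invariant of the whole parsing pass: each key holds the first value A's scan would find
theorem pvFold_get (l : List String) : ∀ d : PySem.Dict String String,
    ((pvZipped l).foldl pvStepB d).get? "2" = (d.get? "2").or (pvScanU2 l) ∧
    ((pvZipped l).foldl pvStepB d).get? "1" = (d.get? "1").or (pvScanU1 l) := by
  induction l with
  | nil => intro d; simp [pvZipped, pvScanU2, pvScanU1]
  | cons a rest ih =>
    intro d
    rw [pvZipped_cons]
    simp only [List.foldl_cons]
    obtain ⟨ih2, ih1⟩ := ih (pvStepB d (a, rest.head?))
    rw [ih2, ih1, pvStepB_get2, pvStepB_get1, pvScanU2_cons, pvScanU1_cons,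
      Option.or_assoc, Option.or_assoc]
    exact ⟨rfl, rfl⟩

-- ===== VERDICT (by name: the statement is the Claim_ definition above) =====
theorem extract_account_from_cmdline_spec : Claim_equal_extract_account_from_cmdline := by
  intro cmdline _
  unfold Spec_extract_account_from_cmdline extract_account_from_cmdline
    extract_account_from_cmdline_alt
  obtain ⟨h2, h1⟩ := pvFold_get cmdline PySem.Dict.empty
  simp only [h2, h1, PySem.Dict.get?_empty, Option.none_or]
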